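-- pv_equiv track=rewrite | github.com/Hygens/hackerearth_hackerrank_solutions | how_many_fibs.py | countFibs
-- ===== SOURCE A (Python) =====
-- def countFibs(low, high):
--     f1, f2, f3 = 1, 2, 3
--     result = 0
--     while f1 <= high:
--         if f1 >= low:
--             result+=1
--         f1=f2; f2=f3; f3=f1+f2
--     return result
-- ===== SOURCE B (Python) =====
-- def _bisect_left(xs, x):
--     lo, hi = 0, len(xs)
--     while lo < hi:
--         mid = (lo + hi) // 2
--         if xs[mid] < x:
--             lo = mid + 1
--         else:
--             hi = mid
--     return lo
--
-- def countFibs(low, high):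
--     fibs = []
--     a, b = 1, 2
--     while a <= high:
--         fibs.append(a)
--         a, b = b, a + b
--     return len(fibs) - _bisect_left(fibs, low)
-- ===== Notes on version B (the rewrite author's own statement) =====
-- stated objective: alternative
-- what changed: A counts matching Fibonacci numbers inline in a single loop; B first builds the sorted list of all Fibonacci values <= high with an unconditional loop, then locates the first value >= low by hand-written binary search and returns len(fibs) - bisect_left(fibs, low).
import Mathlib
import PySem

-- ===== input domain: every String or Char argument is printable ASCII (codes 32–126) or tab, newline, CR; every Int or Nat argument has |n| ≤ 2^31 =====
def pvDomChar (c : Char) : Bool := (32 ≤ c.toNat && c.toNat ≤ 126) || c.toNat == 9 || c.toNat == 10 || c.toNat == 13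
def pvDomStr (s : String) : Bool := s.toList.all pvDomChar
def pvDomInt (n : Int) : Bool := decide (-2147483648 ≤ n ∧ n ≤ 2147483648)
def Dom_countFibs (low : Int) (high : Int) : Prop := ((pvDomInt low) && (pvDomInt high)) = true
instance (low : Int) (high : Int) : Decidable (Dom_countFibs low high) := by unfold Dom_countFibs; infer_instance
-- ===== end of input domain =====

-- B replaces A's single counting loop by: build the sorted list of Fibonacci values ≤ high,
-- then binary-search the first value ≥ low (alternative decomposition; no speed claim).

-- ===== PORT A =====
-- A's while loop; the proof arguments (0 < f1 < f2, f3 = f1 + f2) only justify termination.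
def countFibsLoop (low high f1 f2 f3 result : Int)
    (h1 : 0 < f1) (h2 : f1 < f2) (h3 : f3 = f1 + f2) : Int :=
  if _h : f1 ≤ high then
    countFibsLoop low high f2 f3 (f2 + f3)
      (if f1 ≥ low then result + 1 else result)
      (lt_trans h1 h2) (h3 ▸ lt_add_of_pos_left f2 h1) rfl
  else result
termination_by (high + 1 - f1).toNat
decreasing_by
  exact (Int.toNat_lt_toNat (sub_pos.mpr (Int.lt_add_one_iff.mpr _h))).mpr
    (sub_lt_sub_left h2 (high + 1))

def countFibs (low : Int) (high : Int) : Int :=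
  countFibsLoop low high 1 2 3 0 one_pos one_lt_two rfl

-- ===== PORT B =====
-- Source B's first loop: append each Fibonacci value ≤ high (proof args justify termination only).
def buildFibs (high a b : Int) (acc : List Int)
    (h1 : 0 < a) (h2 : a < b) : List Int :=
  if _h : a ≤ high then
    buildFibs high b (a + b) (acc ++ [a]) (lt_trans h1 h2) (lt_add_of_pos_left b h1)
  else acc
termination_by (high + 1 - a).toNat
decreasing_by
  exact (Int.toNat_lt_toNat (sub_pos.mpr (Int.lt_add_one_iff.mpr _h))).mpr
    (sub_lt_sub_left h2 (high + 1))

-- Source B's _bisect_left loop (h0 and the two midpoint bounds justify termination only).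
def bisectLoop (xs : List Int) (x lo hi : Int) (h0 : 0 ≤ lo) : Int :=
  if h : lo < hi then
    let mid := PySem.Int.floordiv (lo + hi) 2
    have hm1 : lo ≤ mid := (PySem.Int.floordiv_two_mid_bounds (le_of_lt h)).1
    have hm2 : mid < hi := (PySem.Int.floordiv_lt_iff_lt_mul two_pos).mpr
      (lt_of_lt_of_eq (add_lt_add_left h hi) (mul_two hi).symm)
    if (PySem.List.pyGet? xs mid).getD 0 < x then
      bisectLoop xs x (mid + 1) hi (le_trans (le_trans h0 hm1) (Int.le_add_one le_rfl))
    else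
      bisectLoop xs x lo mid h0
  else lo
termination_by (hi - lo).toNat
decreasing_by
  · exact (Int.toNat_lt_toNat (sub_pos.mpr h)).mpr
      (sub_lt_sub_left (Int.lt_add_one_iff.mpr hm1) hi)
  · exact (Int.toNat_lt_toNat (sub_pos.mpr h)).mpr (sub_lt_sub_right hm2 lo)

def countFibs_alt (low : Int) (high : Int) : Int :=
  let fibs := buildFibs high 1 2 [] one_pos one_lt_two
  (fibs.length : Int) - bisectLoop fibs low 0 (fibs.length : Int) le_rfl

-- ===== PRECONDITION & SPEC =====
def Spec_countFibs (low : Int) (high : Int) (out : Int) : Prop := out = countFibs_alt low high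
instance (low : Int) (high : Int) (out : Int) : Decidable (Spec_countFibs low high out) := by unfold Spec_countFibs; infer_instance

-- ===== CLAIM (what is proved, stated in full; the proofs are below) =====
def Claim_equal_countFibs : Prop := ∀ (low : Int) (high : Int), Dom_countFibs low high → Spec_countFibs low high (countFibs low high)

-- ===== LEMMAS AND PROOFS =====

-- accumulator lemma for buildFibs
theorem buildFibs_acc (n : Nat) : ∀ (high a b : Int) (acc : List Int) h1 h2,
    (high + 1 - a).toNat = n →
    buildFibs high a b acc h1 h2 = acc ++ buildFibs high a b [] h1 h2 := by
  induction n using Nat.strong_induction_on with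
  | _ n ih =>
    intro high a b acc h1 h2 hn
    conv_lhs => rw [buildFibs]
    conv_rhs => rw [buildFibs]
    by_cases h : a ≤ high
    · simp only [h, dif_pos]
      rw [ih (high + 1 - b).toNat (by omega) high b (a + b) (acc ++ [a]) (by omega) (by omega) rfl,
          ih (high + 1 - b).toNat (by omega) high b (a + b) ([] ++ [a]) (by omega) (by omega) rfl]
      simp
    · simp [h]

-- A's loop counts exactly the elements ≥ low of the list B builds
theorem loop_eq_countP (n : Nat) : ∀ (low high a b f3 r : Int) h1 h2 h3,
    (high + 1 - a).toNat = n →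
    countFibsLoop low high a b f3 r h1 h2 h3 =
      r + ((buildFibs high a b [] h1 h2).countP (fun v => decide (low ≤ v)) : Int) := by
  induction n using Nat.strong_induction_on with
  | _ n ih =>
    intro low high a b f3 r h1 h2 h3 hn
    subst h3
    rw [countFibsLoop, buildFibs]
    by_cases h : a ≤ high
    · simp only [h, dif_pos]
      rw [ih (high + 1 - b).toNat (by omega) low high b (a + b) (b + (a + b))
            (if a ≥ low then r + 1 else r) (by omega) (by omega) rfl rfl]
      rw [buildFibs_acc (high + 1 - b).toNat high b (a + b) ([] ++ [a]) (by omega) (by omega) rfl]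
      simp [List.countP_cons]
      by_cases hl : low ≤ a <;> simp [hl] <;> omega
    · simp [h]

-- the list B builds is strictly sorted, bounded by high, and ≥ a
theorem buildFibs_sorted (n : Nat) : ∀ (high a b : Int) h1 h2,
    (high + 1 - a).toNat = n →
    (buildFibs high a b [] h1 h2).Pairwise (· < ·) ∧
      ∀ v ∈ buildFibs high a b [] h1 h2, a ≤ v ∧ v ≤ high := by
  induction n using Nat.strong_induction_on with
  | _ n ih =>
    intro high a b h1 h2 hn
    rw [buildFibs]
    by_cases h : a ≤ high
    · simp only [h, dif_pos]
      rw [buildFibs_acc (high + 1 - b).toNat high b (a + b) ([] ++ [a]) (by omega) (by omega) rfl]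
      obtain ⟨hs, hb⟩ := ih (high + 1 - b).toNat (by omega) high b (a + b) (by omega) (by omega) rfl
      constructor
      · simp only [List.nil_append, List.singleton_append, List.pairwise_cons]
        exact ⟨fun v hv => by have := hb v hv; omega, hs⟩
      · intro v hv
        simp only [List.nil_append, List.singleton_append, List.mem_cons] at hv
        rcases hv with rfl | hv
        · omega
        · have := hb v hv; omega
    · simp [h]

-- countP of a list whose i-th element satisfies p iff i < j
theorem countP_eq_of_index (p : Int → Bool) : ∀ (xs : List Int) (j : Nat), j ≤ xs.length →
    (∀ i (h : i < xs.length), (p xs[i] = true ↔ i < j)) → xs.countP p = j := by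
  intro xs
  induction xs with
  | nil =>
    intro j hj _
    simp only [List.length_nil, Nat.le_zero] at hj
    simp [hj]
  | cons a t iht =>
    intro j hj hch
    rw [List.countP_cons]
    have h0 := hch 0 (by simp)
    cases j with
    | zero =>
      have hpa : p a = false := by
        by_cases hb : p a = true
        · exact absurd (h0.mp hb) (by omega)
        · simpa using hb
      have : t.countP p = 0 := by
        apply iht 0 (by omega)
        intro i hi
        have := hch (i + 1) (by simpa using Nat.succ_lt_succ hi)
        simpa using this
      simp [this, hpa]
    | succ k =>
      have hpa : p a = true := h0.mpr (Nat.succ_pos k)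
      have : t.countP p = k := by
        apply iht k (by simpa using hj)
        intro i hi
        have := hch (i + 1) (by simpa using Nat.succ_lt_succ hi)
        simpa [Nat.succ_lt_succ_iff] using this
      simp [this, hpa]

-- binary search returns the number of elements < x in a strictly sorted list
theorem bisect_correct (n : Nat) : ∀ (xs : List Int) (x lo hi : Int) (h0 : 0 ≤ lo),
    (hi - lo).toNat = n →
    lo ≤ hi → hi ≤ (xs.length : Int) →
    (∀ i : Nat, (i : Int) < lo → ∀ h : i < xs.length, xs[i] < x) →
    (∀ i : Nat, hi ≤ (i : Int) → ∀ h : i < xs.length, x ≤ xs[i]) →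
    xs.Pairwise (· < ·) →
    bisectLoop xs x lo hi h0 = (xs.countP (fun v => decide (v < x)) : Int) := by
  induction n using Nat.strong_induction_on with
  | _ n ih =>
    intro xs x lo hi h0 hn hlohi hhilen inv1 inv2 hsort
    rw [bisectLoop]
    by_cases h : lo < hi
    · simp only [h, dif_pos]
      set mid := PySem.Int.floordiv (lo + hi) 2 with hmid
      have hm1 : lo ≤ mid := (PySem.Int.floordiv_two_mid_bounds (le_of_lt h)).1
      have hm2 : mid < hi := by
        rw [hmid]
        exact (PySem.Int.floordiv_lt_iff_lt_mul (by norm_num)).mpr (by omega)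
      have hmnn : 0 ≤ mid := by omega
      have hmlen : mid.toNat < xs.length := by omega
      have hget : (PySem.List.pyGet? xs mid).getD 0 = xs[mid.toNat] := by
        simp only [PySem.List.pyGet?, PySem.List.pyIdx?]
        rw [if_pos hmnn, if_pos (by omega : mid < (xs.length : Int))]
        simp [List.getElem?_eq_getElem hmlen]
      have hsort' := List.pairwise_iff_getElem.mp hsort
      by_cases hc : (PySem.List.pyGet? xs mid).getD 0 < x
      · rw [if_pos hc]
        apply ih (hi - (mid + 1)).toNat (by omega) xs x (mid + 1) hi (by omega) rfl
          (by omega) hhilen ?_ inv2 hsort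
        intro i hilt hlen
        rcases lt_or_eq_of_le (show (i : Int) ≤ mid by omega) with hlt | heq
        · have : i < mid.toNat := by omega
          have := hsort' i mid.toNat hlen hmlen this
          rw [hget] at hc; omega
        · have : i = mid.toNat := by omega
          subst this; rw [hget] at hc; exact hc
      · rw [if_neg hc]
        apply ih (mid - lo).toNat (by omega) xs x lo mid h0 rfl
          (by omega) (by omega) inv1 ?_ hsort
        intro i hile hlen
        rw [not_lt] at hc
        rw [hget] at hc
        rcases lt_or_eq_of_le (show mid.toNat ≤ i by omega) with hlt | heq
        · have := hsort' mid.toNat i hmlen hlen hlt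
          omega
        · subst heq; exact hc
    · rw [dif_neg h]
      have hlo : lo = hi := by omega
      have : xs.countP (fun v => decide (v < x)) = lo.toNat := by
        apply countP_eq_of_index _ xs lo.toNat (by omega)
        intro i hi'
        constructor
        · intro hp
          by_contra hge
          have := inv2 i (by omega) hi'
          simp at hp; omega
        · intro hlt
          have := inv1 i (by omega) hi'
          simpa using this
      rw [this]; omega

-- ===== VERDICT (by name: the statement is the Claim_ definition above) =====
theorem countFibs_spec : Claim_equal_countFibs := by
  intro low high _
  unfold Spec_countFibs
  simp only [countFibs, countFibs_alt]
  rw [loop_eq_countP (high + 1 - 1).toNat low high 1 2 3 0 _ _ _ rfl]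
  rw [bisect_correct ((((buildFibs high 1 2 [] one_pos one_lt_two).length : Int) - 0).toNat)
        (buildFibs high 1 2 [] one_pos one_lt_two) low 0 _ le_rfl rfl
        (by positivity) le_rfl
        (fun i hi' _ => absurd hi' (by omega))
        (fun i hi' h => absurd h (by omega))
        ((buildFibs_sorted (high + 1 - 1).toNat high 1 2 one_pos one_lt_two rfl).1)]
  set L := buildFibs high 1 2 [] one_pos one_lt_two with hL
  have hsplit := List.length_eq_countP_add_countP (fun v => decide (v < low)) (l := L)
  have hcongr : L.countP (fun v => decide ¬(decide (v < low)) = true) =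
      L.countP (fun v => decide (low ≤ v)) := by
    apply List.countP_congr
    intro a _
    by_cases hv : a < low <;> simp [hv] <;> omega
  rw [hcongr] at hsplit
  omega
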